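-- pv_equiv track=rewrite | github.com/Hk4Fun/algorithm_offer | 67_机器人的运动范围.py | movingCount1
-- ===== SOURCE A (Python) =====
-- def movingCount1(threshold, rows, cols):
--     def canReach(row, col, threshold):
--         sum = 0
--         while row or col:
--             sum += row % 10 + col % 10
--             row //= 10
--             col //= 10
--         return sum <= threshold
--
--     def movingCountCore(threshold, rows, cols, row, col, visited):
--         for i, j in [(row, col - 1), (row, col + 1), (row - 1, col), (row + 1, col)]:
--             if 0 <= i < rows and 0 <= j < cols \
--                     and canReach(i, j, threshold) \
--                     and not visited[i * cols + j]:  # 先判断四个方向是否满足条件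
--                 visited[i * cols + j] = True
--                 movingCountCore(threshold, rows, cols, i, j, visited)
--
--     if threshold == None or threshold < 0 or not cols or not rows:
--         return 0
--     visited = [False] * (rows * cols)
--     visited[0] = True
--     movingCountCore(threshold, rows, cols, 0, 0, visited)  # 从（0，0）开始移动
--     return sum(visited)
-- ===== SOURCE B (Python) =====
-- def movingCount1(threshold, rows, cols):
--     # Iterative flood fill with an explicit worklist instead of A's recursion.
--     if threshold is None or threshold < 0 or rows <= 0 or cols <= 0:
--         return 0
--
--     def digitsum(n):
--         s = 0
--         while n:
--             s += n % 10
--             n //= 10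
--         return s
--
--     visited = [False] * (rows * cols)
--     visited[0] = True
--     queue = [(0, 0)]
--     count = 0
--     while queue:
--         r, c = queue.pop(0)
--         count += 1
--         for i, j in ((r, c - 1), (r, c + 1), (r - 1, c), (r + 1, c)):
--             if 0 <= i < rows and 0 <= j < cols \
--                     and not visited[i * cols + j] \
--                     and digitsum(i) + digitsum(j) <= threshold:
--                 visited[i * cols + j] = True
--                 queue.append((i, j))
--     return count
-- ===== Notes on version B (the rewrite author's own statement) =====
-- stated objective: alternative
-- what changed: Replaces A's recursive depth-first flood fill (call-stack recursion marking neighbours) by an iterative breadth-first search over an explicit FIFO worklist that counts cells as they are dequeued instead of summing the visited array.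
-- outside the precondition, e.g. on movingCount1(5, -2, -3): A returns 1, B returns 0
import Mathlib
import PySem

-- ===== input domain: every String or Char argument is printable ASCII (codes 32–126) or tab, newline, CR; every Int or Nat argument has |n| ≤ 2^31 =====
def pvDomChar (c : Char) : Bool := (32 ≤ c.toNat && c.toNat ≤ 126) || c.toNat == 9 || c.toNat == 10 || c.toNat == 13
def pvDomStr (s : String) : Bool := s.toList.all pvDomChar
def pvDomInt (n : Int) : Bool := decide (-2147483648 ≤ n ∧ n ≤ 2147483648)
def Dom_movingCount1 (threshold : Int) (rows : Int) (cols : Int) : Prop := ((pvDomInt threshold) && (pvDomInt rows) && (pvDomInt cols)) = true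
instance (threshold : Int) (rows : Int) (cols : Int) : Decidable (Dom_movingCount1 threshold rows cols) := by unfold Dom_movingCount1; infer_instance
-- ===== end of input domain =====

-- B replaces A's recursive depth-first flood fill by an iterative FIFO-worklist
-- breadth-first search that counts cells as they are dequeued (return value only;
-- A mutates only its own local list).

-- ===== PORT A =====

-- canReach's while loop: digit sum of both coordinates together.  Python's loop
-- diverges for negative arguments; A only calls it with 0 ≤ row, col, where the
-- `.toNat` view below is exact.
def pvDigits (row col : Nat) : Nat :=
  if row = 0 ∧ col = 0 then 0
  else row % 10 + col % 10 + pvDigits (row / 10) (col / 10)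
termination_by row + col
decreasing_by
  rename_i h
  have h1 : row / 10 ≤ row := Nat.div_le_self _ _
  have h2 : col / 10 ≤ col := Nat.div_le_self _ _
  rcases Nat.eq_zero_or_pos row with h3 | h3
  · have hcp : 0 < col := by omega
    have h4 : col / 10 < col := Nat.div_lt_self hcp (by omega)
    omega
  · have h4 : row / 10 < row := Nat.div_lt_self h3 (by omega)
    omega

def canReach (row : Int) (col : Int) (threshold : Int) : Bool :=
  decide ((pvDigits row.toNat col.toNat : Int) ≤ threshold)

-- the body of movingCountCore's for-loop, for one neighbour (i, j);
-- `rec` is the recursive call at the smaller fuel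
def coreAStep (threshold : Int) (rows : Int) (cols : Int)
    (rec : Int → Int → Array Bool → Array Bool)
    (v : Array Bool) (i : Int) (j : Int) : Array Bool :=
  if (0 ≤ i ∧ i < rows) ∧ (0 ≤ j ∧ j < cols) ∧ canReach i j threshold = true ∧
      v.getD (i * cols + j).toNat false = false
  then rec i j (v.setIfInBounds (i * cols + j).toNat true)
  else v

-- movingCountCore; fuel bounds the recursion depth (each call first marks a fresh
-- cell, so depth ≤ rows*cols and the initial fuel is never exhausted)
def coreA (threshold : Int) (rows : Int) (cols : Int) :
    Nat → Int → Int → Array Bool → Array Bool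
  | 0, _, _, visited => visited
  | Nat.succ fuel, row, col, visited =>
    coreAStep threshold rows cols (coreA threshold rows cols fuel)
      (coreAStep threshold rows cols (coreA threshold rows cols fuel)
        (coreAStep threshold rows cols (coreA threshold rows cols fuel)
          (coreAStep threshold rows cols (coreA threshold rows cols fuel)
            visited row (col - 1))
          row (col + 1))
        (row - 1) col)
      (row + 1) col

def movingCount1 (threshold : Int) (rows : Int) (cols : Int) : Int :=
  if threshold < 0 ∨ rows = 0 ∨ cols = 0 then 0
  else
    (coreA threshold rows cols (rows * cols).toNat 0 0
        ((Array.replicate (rows * cols).toNat false).setIfInBounds 0 true)).foldl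
      (fun s b => s + if b then (1 : Int) else 0) 0

-- ===== PORT B =====

-- digitsum's while loop (B only calls it with a nonnegative argument)
def digitsumB (n : Nat) : Nat :=
  if n = 0 then 0
  else n % 10 + digitsumB (n / 10)
termination_by n
decreasing_by
  exact Nat.div_lt_self (by omega) (by omega)

-- the body of the BFS for-loop, for one neighbour p; state = (visited, queue)
def bfsStep (threshold : Int) (rows : Int) (cols : Int)
    (st : Array Bool × List (Int × Int)) (p : Int × Int) : Array Bool × List (Int × Int) :=
  if (0 ≤ p.1 ∧ p.1 < rows) ∧ (0 ≤ p.2 ∧ p.2 < cols) ∧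
      st.1.getD (p.1 * cols + p.2).toNat false = false ∧
      (digitsumB p.1.toNat + digitsumB p.2.toNat : Int) ≤ threshold
  then (st.1.setIfInBounds (p.1 * cols + p.2).toNat true, st.2 ++ [p])
  else st

-- the while-queue loop; fuel bounds the number of pops (= number of marked cells
-- ≤ rows*cols, so the initial fuel is never exhausted)
def bfsLoop (threshold : Int) (rows : Int) (cols : Int) :
    Nat → Array Bool → List (Int × Int) → Int → Int
  | _, _, [], count => count
  | 0, _, _ :: _, count => count
  | Nat.succ fuel, visited, (r, c) :: rest, count =>
    bfsLoop threshold rows cols fuel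
      (List.foldl (bfsStep threshold rows cols) (visited, rest)
        [(r, c - 1), (r, c + 1), (r - 1, c), (r + 1, c)]).1
      (List.foldl (bfsStep threshold rows cols) (visited, rest)
        [(r, c - 1), (r, c + 1), (r - 1, c), (r + 1, c)]).2
      (count + 1)

def movingCount1_alt (threshold : Int) (rows : Int) (cols : Int) : Int :=
  if threshold < 0 ∨ rows ≤ 0 ∨ cols ≤ 0 then 0
  else
    bfsLoop threshold rows cols (rows * cols).toNat
      ((Array.replicate (rows * cols).toNat false).setIfInBounds 0 true) [(0, 0)] 0

-- ===== PRECONDITION & SPEC =====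

-- Pre_ excludes inputs with a negative dimension (and nonnegative threshold, other
-- dimension nonzero): there A either raises IndexError on visited[0] (rows*cols ≤ 0,
-- the empty list) or returns 1 for a nonexistent negative-by-negative grid, an
-- artefact of the sign of rows*cols; B returns 0 on all of them.
def Pre_movingCount1 (threshold : Int) (rows : Int) (cols : Int) : Prop :=
  threshold < 0 ∨ rows = 0 ∨ cols = 0 ∨ (1 ≤ rows ∧ 1 ≤ cols)
instance (threshold : Int) (rows : Int) (cols : Int) : Decidable (Pre_movingCount1 threshold rows cols) := by unfold Pre_movingCount1; infer_instance

def pvWitness_movingCount1 : Int × Int × Int := (5, 3, 4)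

def Spec_movingCount1 (threshold : Int) (rows : Int) (cols : Int) (out : Int) : Prop := out = movingCount1_alt threshold rows cols
instance (threshold : Int) (rows : Int) (cols : Int) (out : Int) : Decidable (Spec_movingCount1 threshold rows cols out) := by unfold Spec_movingCount1; infer_instance

-- ===== CLAIM (what is proved, stated in full; the proofs are below) =====
def Claim_equal_movingCount1 : Prop := ∀ (threshold : Int) (rows : Int) (cols : Int), Dom_movingCount1 threshold rows cols → Pre_movingCount1 threshold rows cols → Spec_movingCount1 threshold rows cols (movingCount1 threshold rows cols)

-- ===== LEMMAS AND PROOFS =====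

-- List-level models of the two ports (same code over List Bool); the ports use
-- Array Bool only for constant-time access, and are bridged to these via toList
def coreAStepL (threshold : Int) (rows : Int) (cols : Int)
    (rec : Int → Int → List Bool → List Bool)
    (v : List Bool) (i : Int) (j : Int) : List Bool :=
  if (0 ≤ i ∧ i < rows) ∧ (0 ≤ j ∧ j < cols) ∧ canReach i j threshold = true ∧
      v.getD (i * cols + j).toNat false = false
  then rec i j (v.set (i * cols + j).toNat true)
  else v

def coreAL (threshold : Int) (rows : Int) (cols : Int) :
    Nat → Int → Int → List Bool → List Bool
  | 0, _, _, visited => visited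
  | Nat.succ fuel, row, col, visited =>
    coreAStepL threshold rows cols (coreAL threshold rows cols fuel)
      (coreAStepL threshold rows cols (coreAL threshold rows cols fuel)
        (coreAStepL threshold rows cols (coreAL threshold rows cols fuel)
          (coreAStepL threshold rows cols (coreAL threshold rows cols fuel)
            visited row (col - 1))
          row (col + 1))
        (row - 1) col)
      (row + 1) col

def movingCount1L (threshold : Int) (rows : Int) (cols : Int) : Int :=
  if threshold < 0 ∨ rows = 0 ∨ cols = 0 then 0
  else
    (coreAL threshold rows cols (rows * cols).toNat 0 0
        ((List.replicate (rows * cols).toNat false).set 0 true)).foldl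
      (fun s b => s + if b then (1 : Int) else 0) 0

def bfsStepL (threshold : Int) (rows : Int) (cols : Int)
    (st : List Bool × List (Int × Int)) (p : Int × Int) : List Bool × List (Int × Int) :=
  if (0 ≤ p.1 ∧ p.1 < rows) ∧ (0 ≤ p.2 ∧ p.2 < cols) ∧
      st.1.getD (p.1 * cols + p.2).toNat false = false ∧
      (digitsumB p.1.toNat + digitsumB p.2.toNat : Int) ≤ threshold
  then (st.1.set (p.1 * cols + p.2).toNat true, st.2 ++ [p])
  else st

def bfsLoopL (threshold : Int) (rows : Int) (cols : Int) :
    Nat → List Bool → List (Int × Int) → Int → Int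
  | _, _, [], count => count
  | 0, _, _ :: _, count => count
  | Nat.succ fuel, visited, (r, c) :: rest, count =>
    bfsLoopL threshold rows cols fuel
      (List.foldl (bfsStepL threshold rows cols) (visited, rest)
        [(r, c - 1), (r, c + 1), (r - 1, c), (r + 1, c)]).1
      (List.foldl (bfsStepL threshold rows cols) (visited, rest)
        [(r, c - 1), (r, c + 1), (r - 1, c), (r + 1, c)]).2
      (count + 1)

def movingCount1_altL (threshold : Int) (rows : Int) (cols : Int) : Int :=
  if threshold < 0 ∨ rows ≤ 0 ∨ cols ≤ 0 then 0
  else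
    bfsLoopL threshold rows cols (rows * cols).toNat
      ((List.replicate (rows * cols).toNat false).set 0 true) [(0, 0)] 0

-- Array → List bridges
theorem aGetD_eq (a : Array Bool) (i : Nat) (d : Bool) : a.getD i d = a.toList.getD i d := by
  by_cases h : i < a.size
  · rw [List.getD_eq_getElem a.toList d (by simpa using h)]
    simp [Array.getD, h]
  · rw [List.getD_eq_default a.toList d (by simpa using Nat.le_of_not_lt h)]
    simp [Array.getD, h]

theorem coreAStep_toList (t rows cols : Int)
    (rec : Int → Int → Array Bool → Array Bool) (recL : Int → Int → List Bool → List Bool)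
    (hrec : ∀ (i j : Int) (v : Array Bool), (rec i j v).toList = recL i j v.toList)
    (v : Array Bool) (i j : Int) :
    (coreAStep t rows cols rec v i j).toList = coreAStepL t rows cols recL v.toList i j := by
  unfold coreAStep coreAStepL
  rw [aGetD_eq]
  split_ifs with h
  · rw [hrec, Array.toList_setIfInBounds]
  · rfl

theorem coreA_toList (t rows cols : Int) : ∀ (fuel : Nat) (row col : Int) (v : Array Bool),
    (coreA t rows cols fuel row col v).toList = coreAL t rows cols fuel row col v.toList := by
  intro fuel
  induction fuel with
  | zero => intro row col v; rfl
  | succ fuel ih =>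
    intro row col v
    have h := coreAStep_toList t rows cols (coreA t rows cols fuel) (coreAL t rows cols fuel) ih
    show (coreAStep t rows cols (coreA t rows cols fuel)
        (coreAStep t rows cols (coreA t rows cols fuel)
          (coreAStep t rows cols (coreA t rows cols fuel)
            (coreAStep t rows cols (coreA t rows cols fuel) v row (col - 1))
            row (col + 1))
          (row - 1) col)
        (row + 1) col).toList
      = coreAStepL t rows cols (coreAL t rows cols fuel)
        (coreAStepL t rows cols (coreAL t rows cols fuel)
          (coreAStepL t rows cols (coreAL t rows cols fuel)
            (coreAStepL t rows cols (coreAL t rows cols fuel) v.toList row (col - 1))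
            row (col + 1))
          (row - 1) col)
        (row + 1) col
    rw [h, h, h, h]

theorem bfsStep_toList (t rows cols : Int) (st : Array Bool × List (Int × Int)) (p : Int × Int) :
    ((bfsStep t rows cols st p).1.toList, (bfsStep t rows cols st p).2)
      = bfsStepL t rows cols (st.1.toList, st.2) p := by
  unfold bfsStep bfsStepL
  dsimp only
  rw [aGetD_eq]
  split_ifs with h
  · dsimp only
    rw [Array.toList_setIfInBounds]
  · rfl

theorem bfsFold_toList (t rows cols : Int) :
    ∀ (ps : List (Int × Int)) (st : Array Bool × List (Int × Int)),
      ((List.foldl (bfsStep t rows cols) st ps).1.toList,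
       (List.foldl (bfsStep t rows cols) st ps).2)
      = List.foldl (bfsStepL t rows cols) (st.1.toList, st.2) ps := by
  intro ps
  induction ps with
  | nil => intro st; rfl
  | cons p ps ihp =>
    intro st
    rw [List.foldl_cons, List.foldl_cons, ihp, bfsStep_toList]

theorem bfsLoop_toList (t rows cols : Int) :
    ∀ (fuel : Nat) (v : Array Bool) (q : List (Int × Int)) (cnt : Int),
      bfsLoop t rows cols fuel v q cnt = bfsLoopL t rows cols fuel v.toList q cnt := by
  intro fuel
  induction fuel with
  | zero => intro v q cnt; cases q <;> rfl
  | succ fuel ih =>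
    intro v q cnt
    cases q with
    | nil => rfl
    | cons rc rest =>
      obtain ⟨r, c⟩ := rc
      have hk := bfsFold_toList t rows cols [(r, c - 1), (r, c + 1), (r - 1, c), (r + 1, c)]
        (v, rest)
      have h1 := congrArg Prod.fst hk
      have h2 := congrArg Prod.snd hk
      dsimp only at h1 h2
      show bfsLoop t rows cols fuel
          (List.foldl (bfsStep t rows cols) (v, rest)
            [(r, c - 1), (r, c + 1), (r - 1, c), (r + 1, c)]).1
          (List.foldl (bfsStep t rows cols) (v, rest)
            [(r, c - 1), (r, c + 1), (r - 1, c), (r + 1, c)]).2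
          (cnt + 1)
        = bfsLoopL t rows cols fuel
          (List.foldl (bfsStepL t rows cols) (v.toList, rest)
            [(r, c - 1), (r, c + 1), (r - 1, c), (r + 1, c)]).1
          (List.foldl (bfsStepL t rows cols) (v.toList, rest)
            [(r, c - 1), (r, c + 1), (r - 1, c), (r + 1, c)]).2
          (cnt + 1)
      rw [ih, h1, h2]

theorem movingCount1_eq_L (t rows cols : Int) : movingCount1 t rows cols = movingCount1L t rows cols := by
  unfold movingCount1 movingCount1L
  split_ifs with h
  · rfl
  · rw [← Array.foldl_toList, coreA_toList, Array.toList_setIfInBounds, Array.toList_replicate]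

theorem movingCount1_alt_eq_L (t rows cols : Int) :
    movingCount1_alt t rows cols = movingCount1_altL t rows cols := by
  unfold movingCount1_alt movingCount1_altL
  split_ifs with h
  · rfl
  · rw [bfsLoop_toList, Array.toList_setIfInBounds, Array.toList_replicate]


-- grid cell index, bounds, digit-sum admissibility, adjacency, reachability
def gIdx (cols : Int) (i : Int) (j : Int) : Nat := (i * cols + j).toNat
def InB (rows : Int) (cols : Int) (i : Int) (j : Int) : Prop := 0 ≤ i ∧ i < rows ∧ 0 ≤ j ∧ j < cols
def Goodc (t : Int) (rows : Int) (cols : Int) (i : Int) (j : Int) : Prop :=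
  InB rows cols i j ∧ (pvDigits i.toNat j.toNat : Int) ≤ t
def Adjc (i : Int) (j : Int) (i' : Int) (j' : Int) : Prop :=
  (i' = i ∧ j' = j - 1) ∨ (i' = i ∧ j' = j + 1) ∨ (i' = i - 1 ∧ j' = j) ∨ (i' = i + 1 ∧ j' = j)

inductive Reachc (t : Int) (rows : Int) (cols : Int) : Int → Int → Prop
  | origin : Reachc t rows cols 0 0
  | step {i j i' j' : Int} : Reachc t rows cols i j → Adjc i j i' j' →
      Goodc t rows cols i' j' → Reachc t rows cols i' j'

def Mk (cols : Int) (v : List Bool) (i : Int) (j : Int) : Prop :=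
  v.getD (gIdx cols i j) false = true
def Closedc (t : Int) (rows : Int) (cols : Int) (v : List Bool) (i : Int) (j : Int) : Prop :=
  ∀ i' j', Adjc i j i' j' → Goodc t rows cols i' j' → Mk cols v i' j'
def SubV (v : List Bool) (w : List Bool) : Prop :=
  ∀ k : Nat, v.getD k false = true → w.getD k false = true
def Soundc (t : Int) (rows : Int) (cols : Int) (v : List Bool) : Prop :=
  ∀ i j, InB rows cols i j → Mk cols v i j → Reachc t rows cols i j
def TC (v : List Bool) : Nat := v.countP (· = true)
def FC (v : List Bool) : Nat := v.countP (· = false)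
def v0 (rows : Int) (cols : Int) : List Bool :=
  (List.replicate ((rows * cols).toNat) false).set 0 true

-- list access / counting basics
theorem getD_oob (v : List Bool) (k : Nat) (h : v.length ≤ k) : v.getD k false = false :=
  List.getD_eq_default _ _ h

theorem getD_set_self (v : List Bool) (k : Nat) (a : Bool) (h : k < v.length) :
    (v.set k a).getD k false = a := by
  simp [List.getD, List.getElem?_set_self h]

theorem getD_set_ne (v : List Bool) (k k' : Nat) (a : Bool) (h : k' ≠ k) :
    (v.set k a).getD k' false = v.getD k' false := by
  simp [List.getD, List.getElem?_set_ne (Ne.symm h)]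

theorem subV_refl (v : List Bool) : SubV v v := fun _ h => h

theorem subV_trans {u v w : List Bool} (h1 : SubV u v) (h2 : SubV v w) : SubV u w :=
  fun k h => h2 k (h1 k h)

theorem subV_set (v : List Bool) (k : Nat) : SubV v (v.set k true) := by
  intro k' h
  by_cases hk : k' = k
  · subst hk
    have hl : k' < v.length := by
      by_contra hh
      rw [getD_oob v k' (by omega)] at h
      exact absurd h (by simp)
    rw [getD_set_self v k' true hl]
  · rw [getD_set_ne v k k' true hk]; exact h

theorem Mk_mono {cols : Int} {v w : List Bool} {i j : Int} (h : SubV v w) :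
    Mk cols v i j → Mk cols w i j := fun hm => h _ hm

theorem Closed_mono {t rows cols : Int} {v w : List Bool} {i j : Int} (h : SubV v w) :
    Closedc t rows cols v i j → Closedc t rows cols w i j :=
  fun hcl i' j' ha hg => Mk_mono h (hcl i' j' ha hg)

theorem TC_add_FC (v : List Bool) : TC v + FC v = v.length := by
  induction v with
  | nil => rfl
  | cons b tl ih => cases b <;> simp [TC, FC, List.countP_cons] at ih ⊢ <;> omega

theorem TC_set_true (v : List Bool) (k : Nat) (hk : k < v.length) (h : v.getD k false = false) :
    TC (v.set k true) = TC v + 1 := by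
  induction v generalizing k with
  | nil => simp at hk
  | cons b tl ih =>
    cases k with
    | zero =>
      simp only [List.getD_cons_zero] at h
      subst h
      simp [TC, List.countP_cons]
    | succ k =>
      simp only [List.getD_cons_succ] at h
      have := ih k (by simpa using hk) h
      simp only [List.set_cons_succ, TC, List.countP_cons] at this ⊢
      omega

theorem FC_set_true (v : List Bool) (k : Nat) (hk : k < v.length) (h : v.getD k false = false) :
    FC v = FC (v.set k true) + 1 := by
  have h1 := TC_add_FC v
  have h2 := TC_add_FC (v.set k true)
  have h3 := TC_set_true v k hk h
  have h4 : (v.set k true).length = v.length := List.length_set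
  omega

theorem sum_foldl_TC : ∀ (v : List Bool) (s : Int),
    v.foldl (fun s b => s + if b then (1 : Int) else 0) s = s + (TC v : Int) := by
  intro v
  induction v with
  | nil => intro s; simp [TC]
  | cons b tl ih =>
    intro s
    cases b <;> simp [TC, List.countP_cons, List.foldl_cons, ih] <;> push_cast <;> ring

-- index arithmetic
theorem gIdx_lt {rows cols i j : Int} (h : InB rows cols i j) :
    gIdx cols i j < (rows * cols).toNat := by
  obtain ⟨h1, h2, h3, h4⟩ := h
  have hc0 : (0 : Int) ≤ cols := by omega
  have e1 : (0 : Int) ≤ i * cols := mul_nonneg h1 hc0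
  have e2 : (i + 1) * cols ≤ rows * cols := mul_le_mul_of_nonneg_right (by omega) hc0
  have e3 : i * cols + j < rows * cols := by nlinarith
  have n1 : (0 : Int) ≤ i * cols + j := by omega
  unfold gIdx
  omega

theorem gIdx_inj {rows cols i j a b : Int} (h1 : InB rows cols i j) (h2 : InB rows cols a b)
    (he : gIdx cols i j = gIdx cols a b) : i = a ∧ j = b := by
  obtain ⟨p1, p2, p3, p4⟩ := h1
  obtain ⟨q1, q2, q3, q4⟩ := h2
  have hc0 : (0 : Int) ≤ cols := by omega
  have n1 : (0 : Int) ≤ i * cols + j := add_nonneg (mul_nonneg p1 hc0) p3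
  have n2 : (0 : Int) ≤ a * cols + b := add_nonneg (mul_nonneg q1 hc0) q3
  have he' : i * cols + j = a * cols + b := by unfold gIdx at he; omega
  have hia : i = a := by
    by_contra hne
    rcases lt_or_gt_of_ne hne with hlt | hlt
    · have hm := mul_le_mul_of_nonneg_right (by omega : i + 1 ≤ a) hc0
      nlinarith
    · have hm := mul_le_mul_of_nonneg_right (by omega : a + 1 ≤ i) hc0
      nlinarith
  subst hia
  exact ⟨rfl, by linarith⟩

theorem gIdx_decode {rows cols : Int} (hr : 1 ≤ rows) (hc : 1 ≤ cols) (k : Nat)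
    (hk : k < (rows * cols).toNat) : ∃ i j, InB rows cols i j ∧ gIdx cols i j = k := by
  have hcpos : (0 : Int) < cols := by omega
  have hkm : (k : Int) < rows * cols := by omega
  refine ⟨(k : Int) / cols, (k : Int) % cols, ⟨?_, ?_, ?_, ?_⟩, ?_⟩
  · exact Int.ediv_nonneg (by positivity) (by omega)
  · exact (Int.ediv_lt_iff_lt_mul hcpos).mpr hkm
  · exact Int.emod_nonneg _ (by omega)
  · exact Int.emod_lt_of_pos _ hcpos
  · have h0 := Int.ediv_add_emod (k : Int) cols
    rw [mul_comm cols ((k : Int) / cols)] at h0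
    unfold gIdx
    omega

-- the initial visited array
theorem length_v0 (rows cols : Int) : (v0 rows cols).length = (rows * cols).toNat := by
  simp [v0]

theorem N_pos {rows cols : Int} (hr : 1 ≤ rows) (hc : 1 ≤ cols) : 1 ≤ (rows * cols).toNat := by
  have h1 : (1 : Int) ≤ rows * cols := by nlinarith
  omega

theorem gIdx_zero (cols : Int) : gIdx cols 0 0 = 0 := by unfold gIdx; simp

theorem getD_replicate_false (n k : Nat) : (List.replicate n false).getD k false = false := by
  by_cases h : k < n
  · exact List.getD_replicate false h
  · exact List.getD_eq_default _ _ (by simpa using Nat.le_of_not_lt h)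

theorem Mk_v0_origin {rows cols : Int} (hr : 1 ≤ rows) (hc : 1 ≤ cols) :
    Mk cols (v0 rows cols) 0 0 := by
  unfold Mk v0
  rw [gIdx_zero]
  refine getD_set_self _ 0 true ?_
  have h := N_pos hr hc
  simp only [List.length_replicate]
  omega

theorem Mk_v0_unique {rows cols i j : Int} (hr : 1 ≤ rows) (hc : 1 ≤ cols)
    (hInB : InB rows cols i j) (h : Mk cols (v0 rows cols) i j) : i = 0 ∧ j = 0 := by
  by_cases he : gIdx cols i j = 0
  · have h00 : InB rows cols 0 0 := ⟨by omega, by omega, by omega, by omega⟩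
    exact gIdx_inj hInB h00 (by rw [he, gIdx_zero])
  · exfalso
    unfold Mk v0 at h
    rw [getD_set_ne _ 0 _ true he, getD_replicate_false] at h
    exact absurd h (by simp)

theorem TC_v0 {rows cols : Int} (hr : 1 ≤ rows) (hc : 1 ≤ cols) : TC (v0 rows cols) = 1 := by
  have h0 : TC (List.replicate ((rows * cols).toNat) false) = 0 := by
    simp [TC, List.countP_replicate]
  have h1 := TC_set_true (List.replicate ((rows * cols).toNat) false) 0
    (by have h := N_pos hr hc; simp only [List.length_replicate]; omega) (getD_replicate_false _ 0)
  unfold v0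
  omega

theorem FC_v0 {rows cols : Int} (hr : 1 ≤ rows) (hc : 1 ≤ cols) :
    FC (v0 rows cols) + 1 = (rows * cols).toNat := by
  have h1 := TC_add_FC (v0 rows cols)
  have h2 := TC_v0 hr hc
  have h3 := length_v0 rows cols
  omega

-- digit-sum bridges
theorem canReach_true_iff (i j t : Int) :
    canReach i j t = true ↔ (pvDigits i.toNat j.toNat : Int) ≤ t := by
  simp [canReach]

theorem digitsumB_unfold (a : Nat) : digitsumB a = a % 10 + digitsumB (a / 10) := by
  by_cases h : a = 0
  · subst h
    rw [digitsumB]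
    simp [digitsumB]
  · conv_lhs => rw [digitsumB]
    simp [h]

theorem pvDigits_eq_aux : ∀ (n a b : Nat), a + b ≤ n →
    pvDigits a b = digitsumB a + digitsumB b := by
  intro n
  induction n with
  | zero =>
    intro a b h
    have ha : a = 0 := by omega
    have hb : b = 0 := by omega
    subst ha; subst hb
    rw [pvDigits]
    simp [digitsumB]
  | succ n ih =>
    intro a b h
    by_cases h0 : a = 0 ∧ b = 0
    · obtain ⟨rfl, rfl⟩ := h0
      rw [pvDigits]
      simp [digitsumB]
    · rw [pvDigits, if_neg h0]
      have hd : a / 10 + b / 10 ≤ n := by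
        have d1 := Nat.div_le_self a 10
        have d2 := Nat.div_le_self b 10
        rcases Nat.eq_zero_or_pos a with ha | ha
        · have hb : 0 < b := by omega
          have d3 : b / 10 < b := Nat.div_lt_self hb (by omega)
          omega
        · have d3 : a / 10 < a := Nat.div_lt_self ha (by omega)
          omega
      rw [ih _ _ hd, digitsumB_unfold a, digitsumB_unfold b]
      omega

theorem pvDigits_eq (a b : Nat) : pvDigits a b = digitsumB a + digitsumB b :=
  pvDigits_eq_aux (a + b) a b le_rfl

-- reachability basics
theorem Reach_InB {t rows cols : Int} (hr : 1 ≤ rows) (hc : 1 ≤ cols) :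
    ∀ {i j : Int}, Reachc t rows cols i j → InB rows cols i j := by
  intro i j h
  induction h with
  | origin => exact ⟨by omega, by omega, by omega, by omega⟩
  | step h1 hadj hgood ih => exact hgood.1

theorem complete_of_closed {t rows cols : Int} (hr : 1 ≤ rows) (hc : 1 ≤ cols) (v : List Bool)
    (h0 : Mk cols v 0 0)
    (hcl : ∀ i j, InB rows cols i j → Mk cols v i j → Closedc t rows cols v i j) :
    ∀ i j, Reachc t rows cols i j → Mk cols v i j := by
  intro i j h
  induction h with
  | origin => exact h0
  | step h1 hadj hgood ih => exact hcl _ _ (Reach_InB hr hc h1) ih _ _ hadj hgood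

-- ===== A side: the recursive DFS =====

def StepConc (t : Int) (rows : Int) (cols : Int) (v : List Bool) (w : List Bool)
    (i : Int) (j : Int) : Prop :=
  w.length = v.length ∧ SubV v w ∧ FC w ≤ FC v ∧ Soundc t rows cols w ∧
  (Goodc t rows cols i j → Mk cols w i j) ∧
  (∀ a b, InB rows cols a b → Mk cols w a b → ¬ Mk cols v a b → Closedc t rows cols w a b)

def CoreConc (t : Int) (rows : Int) (cols : Int) (row : Int) (col : Int)
    (v : List Bool) (w : List Bool) : Prop :=
  w.length = v.length ∧ SubV v w ∧ FC w ≤ FC v ∧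
  Closedc t rows cols w row col ∧ Soundc t rows cols w ∧
  (∀ a b, InB rows cols a b → Mk cols w a b → ¬ Mk cols v a b → Closedc t rows cols w a b)

theorem stepA_main (t rows cols : Int) (hr : 1 ≤ rows) (hc : 1 ≤ cols) (fuel : Nat)
    (ih : ∀ (row col : Int) (v : List Bool), v.length = (rows * cols).toNat → FC v < fuel →
      Soundc t rows cols v → Reachc t rows cols row col →
      CoreConc t rows cols row col v (coreAL t rows cols fuel row col v))
    (row col i j : Int) (v : List Bool)
    (hlen : v.length = (rows * cols).toNat) (hfuel : FC v < fuel + 1)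
    (hsound : Soundc t rows cols v) (hreach : Reachc t rows cols row col)
    (hadj : Adjc row col i j) :
    StepConc t rows cols v (coreAStepL t rows cols (coreAL t rows cols fuel) v i j) i j := by
  unfold coreAStepL
  split_ifs with hcond
  · obtain ⟨hb1, hb2, hcr, hnm⟩ := hcond
    have hInB : InB rows cols i j := ⟨hb1.1, hb1.2, hb2.1, hb2.2⟩
    have hGood : Goodc t rows cols i j := ⟨hInB, (canReach_true_iff i j t).mp hcr⟩
    have hidx : gIdx cols i j < v.length := by rw [hlen]; exact gIdx_lt hInB
    have hlen' : (v.set ((i * cols + j).toNat) true).length = (rows * cols).toNat := by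
      rw [List.length_set, hlen]
    have hMk' : Mk cols (v.set ((i * cols + j).toNat) true) i j := by
      show (v.set (gIdx cols i j) true).getD (gIdx cols i j) false = true
      exact getD_set_self v _ true hidx
    have hFC' : FC v = FC (v.set ((i * cols + j).toNat) true) + 1 := FC_set_true v _ hidx hnm
    have hsub1 : SubV v (v.set ((i * cols + j).toNat) true) := subV_set v _
    have hsound' : Soundc t rows cols (v.set ((i * cols + j).toNat) true) := by
      intro a b hab hm
      by_cases he : gIdx cols a b = gIdx cols i j
      · obtain ⟨h1, h2⟩ := gIdx_inj hab hInB he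
        subst h1; subst h2
        exact Reachc.step hreach hadj hGood
      · refine hsound a b hab ?_
        have hne := getD_set_ne v ((i * cols + j).toNat) (gIdx cols a b) true he
        unfold Mk at hm ⊢
        rw [hne] at hm
        exact hm
    have hreach' : Reachc t rows cols i j := Reachc.step hreach hadj hGood
    have hIH := ih i j (v.set ((i * cols + j).toNat) true) hlen' (by omega) hsound' hreach'
    obtain ⟨l1, l2, l3, l4, l5, l6⟩ := hIH
    refine ⟨?_, subV_trans hsub1 l2, by omega, l5, fun _ => Mk_mono l2 hMk', ?_⟩
    · rw [l1, List.length_set]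
    · intro a b hab hmka hnmka
      by_cases he : gIdx cols a b = gIdx cols i j
      · obtain ⟨h1, h2⟩ := gIdx_inj hab hInB he
        subst h1; subst h2
        exact l4
      · by_cases hv' : Mk cols (v.set ((i * cols + j).toNat) true) a b
        · exfalso
          have hne := getD_set_ne v ((i * cols + j).toNat) (gIdx cols a b) true he
          unfold Mk at hv' hnmka
          rw [hne] at hv'
          exact hnmka hv'
        · exact l6 a b hab hmka hv'
  · refine ⟨rfl, subV_refl v, le_refl _, hsound, ?_, ?_⟩
    · intro hG
      obtain ⟨⟨g1, g2, g3, g4⟩, g5⟩ := hG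
      have hcr : canReach i j t = true := (canReach_true_iff i j t).mpr g5
      cases hgd : v.getD ((i * cols + j).toNat) false with
      | true => exact hgd
      | false => exact absurd ⟨⟨g1, g2⟩, ⟨g3, g4⟩, hcr, hgd⟩ hcond
    · intro a b _ hmk hnm
      exact absurd hmk hnm

theorem coreA_main (t rows cols : Int) (hr : 1 ≤ rows) (hc : 1 ≤ cols) :
    ∀ (fuel : Nat) (row col : Int) (v : List Bool),
      v.length = (rows * cols).toNat → FC v < fuel →
      Soundc t rows cols v → Reachc t rows cols row col →
      CoreConc t rows cols row col v (coreAL t rows cols fuel row col v) := by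
  intro fuel
  induction fuel with
  | zero => intro row col v _ hf _ _; exact absurd hf (Nat.not_lt_zero _)
  | succ fuel ih =>
    intro row col v hlen hfuel hsound hreach
    have hA1 : Adjc row col row (col - 1) := Or.inl ⟨rfl, rfl⟩
    have hA2 : Adjc row col row (col + 1) := Or.inr (Or.inl ⟨rfl, rfl⟩)
    have hA3 : Adjc row col (row - 1) col := Or.inr (Or.inr (Or.inl ⟨rfl, rfl⟩))
    have hA4 : Adjc row col (row + 1) col := Or.inr (Or.inr (Or.inr ⟨rfl, rfl⟩))
    have S1 := stepA_main t rows cols hr hc fuel ih row col row (col - 1) v hlen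
      (by omega) hsound hreach hA1
    set w1 := coreAStepL t rows cols (coreAL t rows cols fuel) v row (col - 1) with hw1
    obtain ⟨a1len, a1sub, a1fc, a1snd, a1mk, a1cl⟩ := S1
    have S2 := stepA_main t rows cols hr hc fuel ih row col row (col + 1) w1
      (by rw [a1len, hlen]) (by omega) a1snd hreach hA2
    set w2 := coreAStepL t rows cols (coreAL t rows cols fuel) w1 row (col + 1) with hw2
    obtain ⟨a2len, a2sub, a2fc, a2snd, a2mk, a2cl⟩ := S2
    have S3 := stepA_main t rows cols hr hc fuel ih row col (row - 1) col w2
      (by rw [a2len, a1len, hlen]) (by omega) a2snd hreach hA3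
    set w3 := coreAStepL t rows cols (coreAL t rows cols fuel) w2 (row - 1) col with hw3
    obtain ⟨a3len, a3sub, a3fc, a3snd, a3mk, a3cl⟩ := S3
    have S4 := stepA_main t rows cols hr hc fuel ih row col (row + 1) col w3
      (by rw [a3len, a2len, a1len, hlen]) (by omega) a3snd hreach hA4
    set w4 := coreAStepL t rows cols (coreAL t rows cols fuel) w3 (row + 1) col with hw4
    obtain ⟨a4len, a4sub, a4fc, a4snd, a4mk, a4cl⟩ := S4
    have hunf : coreAL t rows cols (fuel + 1) row col v = w4 := rfl
    rw [hunf]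
    have hsub14 : SubV w1 w4 := subV_trans a2sub (subV_trans a3sub a4sub)
    have hsub24 : SubV w2 w4 := subV_trans a3sub a4sub
    have hsubv4 : SubV v w4 := subV_trans a1sub hsub14
    refine ⟨by rw [a4len, a3len, a2len, a1len], hsubv4, by omega, ?_, a4snd, ?_⟩
    · intro i' j' hadj hgood
      rcases hadj with ⟨hi, hj⟩ | ⟨hi, hj⟩ | ⟨hi, hj⟩ | ⟨hi, hj⟩ <;> subst hi <;> subst hj
      · exact Mk_mono hsub14 (a1mk hgood)
      · exact Mk_mono hsub24 (a2mk hgood)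
      · exact Mk_mono a4sub (a3mk hgood)
      · exact a4mk hgood
    · intro a b hab hm4 hnv
      by_cases m3 : Mk cols w3 a b
      · by_cases m2 : Mk cols w2 a b
        · by_cases m1 : Mk cols w1 a b
          · exact Closed_mono hsub14 (a1cl a b hab m1 hnv)
          · exact Closed_mono hsub24 (a2cl a b hab m2 m1)
        · exact Closed_mono a4sub (a3cl a b hab m3 m2)
      · exact a4cl a b hab hm4 m3

-- ===== B side: the worklist BFS =====

def BfsInv (t : Int) (rows : Int) (cols : Int) (v : List Bool) (q : List (Int × Int)) : Prop :=
  v.length = (rows * cols).toNat ∧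
  Mk cols v 0 0 ∧
  (∀ p ∈ q, InB rows cols p.1 p.2 ∧ Mk cols v p.1 p.2) ∧
  Soundc t rows cols v ∧
  (∀ i j, InB rows cols i j → Mk cols v i j → (i, j) ∈ q ∨ Closedc t rows cols v i j)

theorem bfsStep_main (t rows cols : Int) (hr : 1 ≤ rows) (hc : 1 ≤ cols)
    (v : List Bool) (q : List (Int × Int)) (i j : Int) (w : List Bool) (q' : List (Int × Int))
    (hlen : v.length = (rows * cols).toNat)
    (hq : ∀ p ∈ q, InB rows cols p.1 p.2 ∧ Mk cols v p.1 p.2)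
    (hsound : Soundc t rows cols v)
    (hR : Goodc t rows cols i j → Reachc t rows cols i j)
    (hw : bfsStepL t rows cols (v, q) (i, j) = (w, q')) :
    w.length = v.length ∧ SubV v w ∧
    TC w + q.length = TC v + q'.length ∧
    FC w + q'.length = FC v + q.length ∧
    (∀ p ∈ q, p ∈ q') ∧
    (∀ p ∈ q', InB rows cols p.1 p.2 ∧ Mk cols w p.1 p.2) ∧
    Soundc t rows cols w ∧
    (Goodc t rows cols i j → Mk cols w i j) ∧
    (∀ a b, InB rows cols a b → Mk cols w a b → Mk cols v a b ∨ (a, b) ∈ q') := by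
  unfold bfsStepL at hw
  dsimp only at hw
  split_ifs at hw with hcond
  · obtain ⟨hb1, hb2, hnm, hds⟩ := hcond
    injection hw with hw1 hw2
    subst hw1; subst hw2
    have hInB : InB rows cols i j := ⟨hb1.1, hb1.2, hb2.1, hb2.2⟩
    have hGood : Goodc t rows cols i j := by
      refine ⟨hInB, ?_⟩
      rw [pvDigits_eq]
      push_cast
      exact hds
    have hidx : gIdx cols i j < v.length := by rw [hlen]; exact gIdx_lt hInB
    have hMk' : Mk cols (v.set ((i * cols + j).toNat) true) i j := by
      show (v.set (gIdx cols i j) true).getD (gIdx cols i j) false = true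
      exact getD_set_self v _ true hidx
    have hTC : TC (v.set ((i * cols + j).toNat) true) = TC v + 1 := TC_set_true v _ hidx hnm
    have hFC : FC v = FC (v.set ((i * cols + j).toNat) true) + 1 := FC_set_true v _ hidx hnm
    refine ⟨List.length_set, subV_set v _, ?_, ?_, ?_, ?_, ?_, fun _ => hMk', ?_⟩
    · simp only [hTC, List.length_append, List.length_cons, List.length_nil]; omega
    · simp only [List.length_append, List.length_cons, List.length_nil]; omega
    · intro p hp; exact List.mem_append.mpr (Or.inl hp)
    · intro p hp
      rcases List.mem_append.mp hp with hp | hp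
      · obtain ⟨h1, h2⟩ := hq p hp
        exact ⟨h1, Mk_mono (subV_set v _) h2⟩
      · simp only [List.mem_cons, List.not_mem_nil, or_false] at hp
        subst hp
        exact ⟨hInB, hMk'⟩
    · intro a b hab hm
      by_cases he : gIdx cols a b = gIdx cols i j
      · obtain ⟨h1, h2⟩ := gIdx_inj hab hInB he
        subst h1; subst h2
        exact hR hGood
      · refine hsound a b hab ?_
        have hne := getD_set_ne v ((i * cols + j).toNat) (gIdx cols a b) true he
        unfold Mk at hm ⊢
        rw [hne] at hm
        exact hm
    · intro a b hab hm
      by_cases he : gIdx cols a b = gIdx cols i j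
      · obtain ⟨h1, h2⟩ := gIdx_inj hab hInB he
        subst h1; subst h2
        right
        exact List.mem_append.mpr (Or.inr (by simp))
      · left
        have hne := getD_set_ne v ((i * cols + j).toNat) (gIdx cols a b) true he
        unfold Mk at hm ⊢
        rw [hne] at hm
        exact hm
  · injection hw with hw1 hw2
    subst hw1; subst hw2
    refine ⟨rfl, subV_refl v, rfl, rfl, fun p hp => hp, hq, hsound, ?_, fun a b _ hm => Or.inl hm⟩
    intro hG
    obtain ⟨⟨g1, g2, g3, g4⟩, g5⟩ := hG
    have hds : (digitsumB i.toNat + digitsumB j.toNat : Int) ≤ t := by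
      rw [pvDigits_eq] at g5
      push_cast at g5
      exact g5
    cases hgd : v.getD ((i * cols + j).toNat) false with
    | true => exact hgd
    | false => exact absurd ⟨⟨g1, g2⟩, ⟨g3, g4⟩, hgd, hds⟩ hcond

theorem bfs_nil_case (t rows cols : Int) (hr : 1 ≤ rows) (hc : 1 ≤ cols)
    (v : List Bool) (count : Int)
    (hinv : BfsInv t rows cols v [])
    (hcnt : count + ((List.length (α := Int × Int) []) : Int) = (TC v : Int)) :
    ∃ w : List Bool, count = (TC w : Int) ∧ w.length = (rows * cols).toNat ∧
      (∀ i j, InB rows cols i j → (Mk cols w i j ↔ Reachc t rows cols i j)) := by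
  obtain ⟨hvlen, h00, _, hsnd, hacl⟩ := hinv
  refine ⟨v, by simpa using hcnt, hvlen, ?_⟩
  intro i j hInB
  constructor
  · exact hsnd i j hInB
  · intro hre
    refine complete_of_closed hr hc v h00 ?_ i j hre
    intro a b hab hm
    rcases hacl a b hab hm with hmem | hcl
    · simp at hmem
    · exact hcl

theorem bfsLoop_main (t rows cols : Int) (hr : 1 ≤ rows) (hc : 1 ≤ cols) :
    ∀ (fuel : Nat) (v : List Bool) (q : List (Int × Int)) (count : Int),
      BfsInv t rows cols v q →
      q.length + FC v ≤ fuel →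
      count + (q.length : Int) = (TC v : Int) →
      ∃ w : List Bool,
        bfsLoopL t rows cols fuel v q count = (TC w : Int) ∧
        w.length = (rows * cols).toNat ∧
        (∀ i j, InB rows cols i j → (Mk cols w i j ↔ Reachc t rows cols i j)) := by
  intro fuel
  induction fuel with
  | zero =>
    intro v q count hinv hf hcnt
    cases q with
    | nil =>
      obtain ⟨w, h1, h2, h3⟩ := bfs_nil_case t rows cols hr hc v count hinv hcnt
      exact ⟨w, h1, h2, h3⟩
    | cons p q0 =>
      exfalso
      simp only [List.length_cons] at hf
      omega
  | succ fuel ihf =>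
    intro v q count hinv hf hcnt
    cases q with
    | nil =>
      obtain ⟨w, h1, h2, h3⟩ := bfs_nil_case t rows cols hr hc v count hinv hcnt
      exact ⟨w, h1, h2, h3⟩
    | cons rc rest =>
      obtain ⟨r, c⟩ := rc
      obtain ⟨hvlen, h00, hqinv, hsnd, hacl⟩ := hinv
      have hrc := hqinv (r, c) (by simp)
      have hreachrc : Reachc t rows cols r c := hsnd r c hrc.1 hrc.2
      have hrest : ∀ p ∈ rest, InB rows cols p.1 p.2 ∧ Mk cols v p.1 p.2 :=
        fun p hp => hqinv p (by simp [hp])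
      rcases hp1 : bfsStepL t rows cols (v, rest) (r, c - 1) with ⟨w1, q1⟩
      have B1 := bfsStep_main t rows cols hr hc v rest r (c - 1) w1 q1 hvlen hrest hsnd
        (fun hg => Reachc.step hreachrc (Or.inl ⟨rfl, rfl⟩) hg) hp1
      obtain ⟨b1len, b1sub, b1tc, b1fc, b1qs, b1q, b1snd, b1mk, b1new⟩ := B1
      rcases hp2 : bfsStepL t rows cols (w1, q1) (r, c + 1) with ⟨w2, q2⟩
      have B2 := bfsStep_main t rows cols hr hc w1 q1 r (c + 1) w2 q2 (by rw [b1len, hvlen])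
        b1q b1snd (fun hg => Reachc.step hreachrc (Or.inr (Or.inl ⟨rfl, rfl⟩)) hg) hp2
      obtain ⟨b2len, b2sub, b2tc, b2fc, b2qs, b2q, b2snd, b2mk, b2new⟩ := B2
      rcases hp3 : bfsStepL t rows cols (w2, q2) (r - 1, c) with ⟨w3, q3⟩
      have B3 := bfsStep_main t rows cols hr hc w2 q2 (r - 1) c w3 q3
        (by rw [b2len, b1len, hvlen]) b2q b2snd
        (fun hg => Reachc.step hreachrc (Or.inr (Or.inr (Or.inl ⟨rfl, rfl⟩))) hg) hp3
      obtain ⟨b3len, b3sub, b3tc, b3fc, b3qs, b3q, b3snd, b3mk, b3new⟩ := B3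
      rcases hp4 : bfsStepL t rows cols (w3, q3) (r + 1, c) with ⟨w4, q4⟩
      have B4 := bfsStep_main t rows cols hr hc w3 q3 (r + 1) c w4 q4
        (by rw [b3len, b2len, b1len, hvlen]) b3q b3snd
        (fun hg => Reachc.step hreachrc (Or.inr (Or.inr (Or.inr ⟨rfl, rfl⟩))) hg) hp4
      obtain ⟨b4len, b4sub, b4tc, b4fc, b4qs, b4q, b4snd, b4mk, b4new⟩ := B4
      have hfold : List.foldl (bfsStepL t rows cols) (v, rest)
          [(r, c - 1), (r, c + 1), (r - 1, c), (r + 1, c)] = (w4, q4) := by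
        simp only [List.foldl_cons, List.foldl_nil, hp1, hp2, hp3, hp4]
      have hunf : bfsLoopL t rows cols (fuel + 1) v ((r, c) :: rest) count
          = bfsLoopL t rows cols fuel
            (List.foldl (bfsStepL t rows cols) (v, rest)
              [(r, c - 1), (r, c + 1), (r - 1, c), (r + 1, c)]).1
            (List.foldl (bfsStepL t rows cols) (v, rest)
              [(r, c - 1), (r, c + 1), (r - 1, c), (r + 1, c)]).2
            (count + 1) := rfl
      rw [hfold] at hunf
      dsimp only at hunf
      have hsub14 : SubV w1 w4 := subV_trans b2sub (subV_trans b3sub b4sub)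
      have hsubv4 : SubV v w4 := subV_trans b1sub hsub14
      have hClrc : Closedc t rows cols w4 r c := by
        intro i' j' hadj hgood
        rcases hadj with ⟨hi, hj⟩ | ⟨hi, hj⟩ | ⟨hi, hj⟩ | ⟨hi, hj⟩ <;> subst hi <;> subst hj
        · exact Mk_mono hsub14 (b1mk hgood)
        · exact Mk_mono (subV_trans b3sub b4sub) (b2mk hgood)
        · exact Mk_mono b4sub (b3mk hgood)
        · exact b4mk hgood
      have hinv' : BfsInv t rows cols w4 q4 := by
        refine ⟨by rw [b4len, b3len, b2len, b1len, hvlen], Mk_mono hsubv4 h00, b4q, b4snd, ?_⟩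
        intro a b hab hm4
        by_cases m3 : Mk cols w3 a b
        · by_cases m2 : Mk cols w2 a b
          · by_cases m1 : Mk cols w1 a b
            · by_cases m0 : Mk cols v a b
              · rcases hacl a b hab m0 with hmem | hcl
                · rcases List.mem_cons.mp hmem with heq | hmem'
                  · right
                    rw [Prod.mk.injEq] at heq
                    obtain ⟨h1, h2⟩ := heq
                    subst h1; subst h2
                    exact hClrc
                  · left
                    exact b4qs _ (b3qs _ (b2qs _ (b1qs _ hmem')))
                · right
                  exact Closed_mono hsubv4 hcl
              · rcases b1new a b hab m1 with hm | hmem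
                · exact absurd hm m0
                · left
                  exact b4qs _ (b3qs _ (b2qs _ hmem))
            · rcases b2new a b hab m2 with hm | hmem
              · exact absurd hm m1
              · left
                exact b4qs _ (b3qs _ hmem)
          · rcases b3new a b hab m3 with hm | hmem
            · exact absurd hm m2
            · left
              exact b4qs _ hmem
        · rcases b4new a b hab hm4 with hm | hmem
          · exact absurd hm m3
          · left
            exact hmem
      have hf' : q4.length + FC w4 ≤ fuel := by
        simp only [List.length_cons] at hf
        omega
      have hcnt' : (count + 1) + (q4.length : Int) = (TC w4 : Int) := by
        simp only [List.length_cons] at hcnt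
        push_cast at hcnt ⊢
        omega
      obtain ⟨w, hwres, hwlen, hwiff⟩ := ihf w4 q4 (count + 1) hinv' hf' hcnt'
      refine ⟨w, ?_, hwlen, hwiff⟩
      rw [hunf]
      exact hwres

-- ===== the two programs agree on positive grids =====

theorem main_pos (t rows cols : Int) (ht : ¬ t < 0) (hr : 1 ≤ rows) (hc : 1 ≤ cols) :
    movingCount1L t rows cols = movingCount1_altL t rows cols := by
  unfold movingCount1L movingCount1_altL
  rw [if_neg (by omega : ¬ (t < 0 ∨ rows = 0 ∨ cols = 0)),
      if_neg (by omega : ¬ (t < 0 ∨ rows ≤ 0 ∨ cols ≤ 0))]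
  show (coreAL t rows cols ((rows * cols).toNat) 0 0 (v0 rows cols)).foldl
      (fun s b => s + if b then (1 : Int) else 0) 0
    = bfsLoopL t rows cols ((rows * cols).toNat) (v0 rows cols) [(0, 0)] 0
  have hlen0 := length_v0 rows cols
  have hsnd0 : Soundc t rows cols (v0 rows cols) := by
    intro i j hInB hMk
    obtain ⟨h1, h2⟩ := Mk_v0_unique hr hc hInB hMk
    subst h1; subst h2
    exact Reachc.origin
  have hA := coreA_main t rows cols hr hc ((rows * cols).toNat) 0 0 (v0 rows cols) hlen0
    (by have := FC_v0 hr hc; omega) hsnd0 Reachc.origin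
  obtain ⟨aLen, aSub, aFC, aCl, aSnd, aNew⟩ := hA
  set wA := coreAL t rows cols ((rows * cols).toNat) 0 0 (v0 rows cols) with hwa
  have hAiff : ∀ i j, InB rows cols i j → (Mk cols wA i j ↔ Reachc t rows cols i j) := by
    intro i j hInB
    constructor
    · exact aSnd i j hInB
    · intro hre
      refine complete_of_closed hr hc wA (Mk_mono aSub (Mk_v0_origin hr hc)) ?_ i j hre
      intro a b hab hm
      by_cases hv : Mk cols (v0 rows cols) a b
      · obtain ⟨h1, h2⟩ := Mk_v0_unique hr hc hab hv
        subst h1; subst h2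
        exact aCl
      · exact aNew a b hab hm hv
  have hinv0 : BfsInv t rows cols (v0 rows cols) [(0, 0)] := by
    refine ⟨hlen0, Mk_v0_origin hr hc, ?_, hsnd0, ?_⟩
    · intro p hp
      simp only [List.mem_cons, List.not_mem_nil, or_false] at hp
      subst hp
      exact ⟨⟨by omega, by omega, by omega, by omega⟩, Mk_v0_origin hr hc⟩
    · intro i j hInB hMk
      left
      obtain ⟨h1, h2⟩ := Mk_v0_unique hr hc hInB hMk
      subst h1; subst h2
      simp
  have hB := bfsLoop_main t rows cols hr hc ((rows * cols).toNat) (v0 rows cols) [(0, 0)] 0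
    hinv0 (by simp only [List.length_cons, List.length_nil]; have := FC_v0 hr hc; omega)
    (by simp only [List.length_cons, List.length_nil]; rw [TC_v0 hr hc]; norm_num)
  obtain ⟨wB, hBeq, bLen, hBiff⟩ := hB
  have hEq : wA = wB := by
    apply List.ext_getElem (by rw [aLen, hlen0, bLen])
    intro k h1 h2
    have hk : k < (rows * cols).toNat := by rw [aLen, hlen0] at h1; exact h1
    obtain ⟨i, j, hInB, hgidx⟩ := gIdx_decode hr hc k hk
    have e1 : wA.getD k false = wA[k] := List.getD_eq_getElem _ _ h1
    have e2 : wB.getD k false = wB[k] := List.getD_eq_getElem _ _ h2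
    have hiff : (wA.getD k false = true) ↔ (wB.getD k false = true) := by
      rw [← hgidx]
      exact (hAiff i j hInB).trans ((hBiff i j hInB).symm)
    rw [e1, e2] at hiff
    exact Bool.eq_iff_iff.mpr hiff
  rw [sum_foldl_TC, hBeq, hEq]
  omega

-- ===== VERDICT (by name: the statement is the Claim_ definition above) =====
theorem movingCount1_spec : Claim_equal_movingCount1 := by
  intro t rows cols hdom hpre
  unfold Spec_movingCount1
  rw [movingCount1_eq_L, movingCount1_alt_eq_L]
  by_cases ht : t < 0
  · unfold movingCount1L movingCount1_altL
    rw [if_pos (Or.inl ht), if_pos (Or.inl ht)]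
  · rcases hpre with h | h | h | ⟨h1, h2⟩
    · exact absurd h ht
    · unfold movingCount1L movingCount1_altL
      rw [if_pos (Or.inr (Or.inl h)), if_pos (Or.inr (Or.inl (by omega)))]
    · unfold movingCount1L movingCount1_altL
      rw [if_pos (Or.inr (Or.inr h)), if_pos (Or.inr (Or.inr (by omega)))]
    · exact main_pos t rows cols ht h1 h2
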